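-- pv_equiv track=rewrite | github.com/lordbernardo27/LinkCraftor | backend/server/site_reader/phrase_generators.py | _pick_slug_segment
-- ===== SOURCE A (Python) =====
-- _DROP_SEGMENTS = {
--     "blog", "blogs", "post", "posts", "article", "articles", "news", "insights",
--     "category", "categories", "tag", "tags", "author", "authors", "page",
-- }
--
-- def _pick_slug_segment(path: str) -> str:
--     """
--     Take the last meaningful segment in the path, excluding common non-post segments.
--     """
--     segs = [s for s in (path or "").split("/") if s.strip()]
--     if not segs:
--         return ""
--     meaningful = [s for s in segs if s.strip().lower() not in _DROP_SEGMENTS]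
--     if not meaningful:
--         meaningful = segs
--     return meaningful[-1].strip()
-- ===== SOURCE B (Python) =====
-- _DROP_SEGMENTS = {
--     "blog", "blogs", "post", "posts", "article", "articles", "news", "insights",
--     "category", "categories", "tag", "tags", "author", "authors", "page",
-- }
--
-- def _pick_slug_segment(path: str) -> str:
--     # Single early-exiting reverse scan instead of a second filtering pass.
--     segs = [s for s in (path or "").split("/") if s.strip()]
--     if not segs:
--         return ""
--     for s in reversed(segs):
--         if s.strip().lower() not in _DROP_SEGMENTS:
--             return s.strip()
--     return segs[-1].strip()
-- ===== Notes on version B (the rewrite author's own statement) =====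
-- stated objective: alternative
-- what changed: Replaces the second forward filtering comprehension plus [-1] indexing by a single early-exiting reverse scan that returns the first non-dropped segment, with an explicit last-segment fallback.
import Mathlib
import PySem

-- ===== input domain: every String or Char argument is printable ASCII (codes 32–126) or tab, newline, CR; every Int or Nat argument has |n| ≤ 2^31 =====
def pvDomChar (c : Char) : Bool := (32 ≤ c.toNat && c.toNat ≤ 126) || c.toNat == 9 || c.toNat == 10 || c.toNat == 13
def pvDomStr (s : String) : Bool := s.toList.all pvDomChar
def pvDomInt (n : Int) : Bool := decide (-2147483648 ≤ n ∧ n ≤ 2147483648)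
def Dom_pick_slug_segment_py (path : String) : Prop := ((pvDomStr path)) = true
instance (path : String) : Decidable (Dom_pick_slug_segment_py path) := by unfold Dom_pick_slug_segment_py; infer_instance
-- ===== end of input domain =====

-- B replaces A's second filtering pass + [-1] index by one early-exiting reverse scan (alternative decomposition; return value only).

-- ===== PORT A =====
def pvDropSegments : List String :=
  ["blog", "blogs", "post", "posts", "article", "articles", "news", "insights",
   "category", "categories", "tag", "tags", "author", "authors", "page"]

def pick_slug_segment_py (path : String) : String :=
  let segs := ((PySem.Str.split? path "/").getD []).filter (fun s => PySem.Str.strip s != "")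
  if segs = [] then ""
  else
    let meaningful := segs.filter (fun s => !(pvDropSegments.contains (PySem.Str.lower (PySem.Str.strip s))))
    let m := if meaningful = [] then segs else meaningful
    match PySem.List.pyGet? m (-1) with
    | some s => PySem.Str.strip s
    | none => ""   -- unreachable: m is nonempty

-- ===== PORT B =====
-- the early-exiting reverse scan (the for-loop over reversed(segs))
def pvPickRev : List String → Option String
  | [] => none
  | s :: rest =>
      if !(pvDropSegments.contains (PySem.Str.lower (PySem.Str.strip s))) then some s
      else pvPickRev rest

def pick_slug_segment_py_alt (path : String) : String :=
  let segs := ((PySem.Str.split? path "/").getD []).filter (fun s => PySem.Str.strip s != "")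
  match segs with
  | [] => ""
  | _ =>
    match pvPickRev segs.reverse with
    | some s => PySem.Str.strip s
    | none => PySem.Str.strip (segs.getLast! )  -- segs[-1]

-- ===== PRECONDITION & SPEC =====
def Spec_pick_slug_segment_py (path : String) (out : String) : Prop := out = pick_slug_segment_py_alt path
instance (path : String) (out : String) : Decidable (Spec_pick_slug_segment_py path out) := by unfold Spec_pick_slug_segment_py; infer_instance

-- ===== CLAIM (what is proved, stated in full; the proofs are below) =====
def Claim_equal_pick_slug_segment_py : Prop := ∀ (path : String), Dom_pick_slug_segment_py path → Spec_pick_slug_segment_py path (pick_slug_segment_py path)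

-- ===== LEMMAS AND PROOFS =====
theorem pvPickRev_eq_find? (l : List String) :
    pvPickRev l = l.find? (fun s => !(pvDropSegments.contains (PySem.Str.lower (PySem.Str.strip s)))) := by
  induction l with
  | nil => rfl
  | cons s rest ih =>
      simp only [pvPickRev, List.find?, ih]
      split_ifs with h <;> simp_all

theorem find?_reverse_eq (p : String → Bool) (l : List String) :
    l.reverse.find? p = (l.filter p).getLast? := by
  rw [← List.head?_filter, List.filter_reverse, List.head?_reverse]

theorem pyGetNeg1 (l : List String) (h : l ≠ []) :
    PySem.List.pyGet? l (-1) = l.getLast? := by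
  have hl : 0 < l.length := List.length_pos_iff.mpr h
  have h2 : -((l.length : Int)) ≤ -1 := by omega
  simp [PySem.List.pyGet?, PySem.List.pyIdx?, h2, List.getLast?_eq_getElem?]

theorem getLast?_eq_some_getLast! (l : List String) (h : l ≠ []) :
    l.getLast? = some l.getLast! := by
  cases l with
  | nil => simp at h
  | cons a t => simp [List.getLast!, List.getLast?_eq_some_getLast]

theorem main_lists (segs : List String) :
    (if segs = [] then "" else
      let meaningful := segs.filter (fun s => !(pvDropSegments.contains (PySem.Str.lower (PySem.Str.strip s))))
      let m := if meaningful = [] then segs else meaningful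
      match PySem.List.pyGet? m (-1) with
      | some s => PySem.Str.strip s
      | none => "")
    = (match segs with
      | [] => ""
      | _ =>
        match pvPickRev segs.reverse with
        | some s => PySem.Str.strip s
        | none => PySem.Str.strip segs.getLast!) := by
  cases hseg : segs with
  | nil => rfl
  | cons a t =>
    rw [← hseg]
    have hne : segs ≠ [] := by simp [hseg]
    rw [if_neg hne]
    have hB : (match segs with
        | [] => ""
        | _ => match pvPickRev segs.reverse with
               | some s => PySem.Str.strip s
               | none => PySem.Str.strip segs.getLast!)
        = (match pvPickRev segs.reverse with
           | some s => PySem.Str.strip s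
           | none => PySem.Str.strip segs.getLast!) := by
      rw [hseg]
    rw [hB, pvPickRev_eq_find?, find?_reverse_eq]
    set p := fun s => !(pvDropSegments.contains (PySem.Str.lower (PySem.Str.strip s))) with hp
    by_cases hm : segs.filter p = []
    · simp only [hm, reduceIte, List.getLast?_nil]
      rw [pyGetNeg1 segs hne, getLast?_eq_some_getLast! segs hne]
    · simp only [hm, reduceIte]
      rw [pyGetNeg1 _ hm, getLast?_eq_some_getLast! _ hm]

-- ===== VERDICT (by name: the statement is the Claim_ definition above) =====
theorem pick_slug_segment_py_spec : Claim_equal_pick_slug_segment_py := by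
  intro path _
  unfold Spec_pick_slug_segment_py pick_slug_segment_py pick_slug_segment_py_alt
  exact main_lists _
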